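-- pv_equiv track=rewrite | github.com/nb-agentic/multi-agent-facility-manager | src/intellicenter/orchestrator/coordinator.py | _run
-- ===== SOURCE A (Python) =====
-- from typing import List, Any, Dict, Optional
--
-- def _run(conflicting_decisions: List[dict], system_dependencies: dict = None) -> str:
--     if not conflicting_decisions:
--         return "No conflicts detected"
--
--     resolution = []
--     priority_order = ["critical", "high", "medium", "low"]
--
--     # Sort decisions by priority
--     sorted_decisions = sorted(
--         conflicting_decisions,
--         key=lambda x: priority_order.index(x.get("priority", "low")),
--         reverse=True
--     )
--
--     # Resolve conflicts by priority
--     for i, decision in enumerate(sorted_decisions):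
--         agent_type = decision.get("agent_type", "unknown")
--         priority = decision.get("priority", "low")
--         action = decision.get("action", "unknown")
--
--         resolution.append(f"{agent_type}: {action} (Priority: {priority})")
--
--         # Check for system dependencies
--         if system_dependencies and agent_type in system_dependencies:
--             dependencies = system_dependencies[agent_type]
--             if dependencies:
--                 resolution.append(f"  Dependencies: {', '.join(dependencies)}")
--
--     return "Conflict Resolution:\n" + "\n".join(resolution)
-- ===== SOURCE B (Python) =====
-- def _run(conflicting_decisions, system_dependencies=None):
--     if not conflicting_decisions:
--         return "No conflicts detected"
--
--     priority_order = ["critical", "high", "medium", "low"]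
--
--     # One filtered scan per priority level, instead of a comparison sort:
--     # emit every decision whose priority index equals `wanted`, in input order.
--     def lines_for(wanted):
--         out = []
--         for decision in conflicting_decisions:
--             if priority_order.index(decision.get("priority", "low")) == wanted:
--                 agent_type = decision.get("agent_type", "unknown")
--                 line = (agent_type + ": " + decision.get("action", "unknown")
--                         + " (Priority: " + decision.get("priority", "low") + ")")
--                 out.append(line)
--                 if system_dependencies and agent_type in system_dependencies:
--                     dependencies = system_dependencies[agent_type]
--                     if dependencies:
--                         out.append("  Dependencies: " + ", ".join(dependencies))
--         return out
--
--     resolution = []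
--     # highest priority index first reproduces sort(key=index, reverse=True), stably
--     for wanted in (3, 2, 1, 0):
--         resolution += lines_for(wanted)
--     return "Conflict Resolution:\n" + "\n".join(resolution)
-- ===== Notes on version B (the rewrite author's own statement) =====
-- stated objective: alternative
-- what changed: Replaces the stable comparison sort by priority index (sorted with key, reverse=True) with four filtered scans over the input, one per priority level from index 3 down to 0, emitting lines directly in each pass; unknown priorities still raise ValueError via the same .index lookup (excluded by Pre_).
import Mathlib
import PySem

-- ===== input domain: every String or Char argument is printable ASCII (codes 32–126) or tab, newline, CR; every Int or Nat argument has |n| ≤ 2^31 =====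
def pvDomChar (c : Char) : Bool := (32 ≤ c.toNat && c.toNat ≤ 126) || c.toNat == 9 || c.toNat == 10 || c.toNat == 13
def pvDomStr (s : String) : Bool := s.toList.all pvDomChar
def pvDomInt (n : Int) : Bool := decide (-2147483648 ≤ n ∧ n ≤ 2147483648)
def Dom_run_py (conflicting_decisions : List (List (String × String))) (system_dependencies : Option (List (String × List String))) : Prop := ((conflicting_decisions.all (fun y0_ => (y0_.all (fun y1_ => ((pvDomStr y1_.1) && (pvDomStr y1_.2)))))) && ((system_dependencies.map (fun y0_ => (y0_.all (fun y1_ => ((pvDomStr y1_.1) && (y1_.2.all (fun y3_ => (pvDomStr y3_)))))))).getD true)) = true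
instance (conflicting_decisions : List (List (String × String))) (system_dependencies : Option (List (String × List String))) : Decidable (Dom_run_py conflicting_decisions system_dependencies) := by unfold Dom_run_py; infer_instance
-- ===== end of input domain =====

-- B replaces A's comparison sort (key = priority index, reverse=True) with four filtered
-- scans over the input, one per priority level from index 3 down to 0 (objective: alternative).

-- ===== PORT A =====
def pvPriorityOrder : List String := ["critical", "high", "medium", "low"]

-- decision.get(k, dflt): first-match lookup in the association list
def pvGetD (d : List (String × String)) (k dflt : String) : String :=
  PySem.Dict.getD (PySem.Dict.mk d) k dflt

-- priority_order.index(p); Pre_ excludes the ValueError case, so getD 0 is never read there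
def pvKey (d : List (String × String)) : Nat :=
  (PySem.List.index? pvPriorityOrder (pvGetD d "priority" "low")).getD 0

-- the lines one decision contributes inside A's loop over sorted_decisions
def pvEmit (sd : Option (List (String × List String))) (d : List (String × String)) : List String :=
  let agent := pvGetD d "agent_type" "unknown"
  let priority := pvGetD d "priority" "low"
  let action := pvGetD d "action" "unknown"
  let line := agent ++ ": " ++ action ++ " (Priority: " ++ priority ++ ")"
  match sd with
  | none => [line]
  | some sdl =>
    match PySem.Dict.get? (PySem.Dict.mk sdl) agent with
    | none => [line]
    | some deps =>
      if deps = [] then [line]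
      else [line, "  Dependencies: " ++ PySem.Str.join ", " deps]

def run_py (conflicting_decisions : List (List (String × String))) (system_dependencies : Option (List (String × List String))) : String :=
  if conflicting_decisions = [] then "No conflicts detected"
  else
    let sorted_decisions := PySem.List.sorted conflicting_decisions (fun d => pvKey d) true
    let resolution := sorted_decisions.foldl (fun acc d => acc ++ pvEmit system_dependencies d) []
    "Conflict Resolution:\n" ++ PySem.Str.join "\n" resolution

-- ===== PORT B =====
-- lines_for(wanted): one scan of the input, emitting only decisions of priority index `wanted`
def pvLinesFor (conflicting_decisions : List (List (String × String)))
    (system_dependencies : Option (List (String × List String))) (wanted : Nat) : List String :=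
  match conflicting_decisions with
  | [] => []
  | decision :: rest =>
    if (PySem.List.index? ["critical", "high", "medium", "low"]
          (PySem.Dict.getD (PySem.Dict.mk decision) "priority" "low")).getD 0 == wanted then
      let agent_type := PySem.Dict.getD (PySem.Dict.mk decision) "agent_type" "unknown"
      let line := agent_type ++ ": " ++ PySem.Dict.getD (PySem.Dict.mk decision) "action" "unknown"
          ++ " (Priority: " ++ PySem.Dict.getD (PySem.Dict.mk decision) "priority" "low" ++ ")"
      (match system_dependencies with
       | none => [line]
       | some sdl =>
         match PySem.Dict.get? (PySem.Dict.mk sdl) agent_type with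
         | none => [line]
         | some dependencies =>
           if dependencies = [] then [line]
           else [line, "  Dependencies: " ++ PySem.Str.join ", " dependencies])
        ++ pvLinesFor rest system_dependencies wanted
    else pvLinesFor rest system_dependencies wanted

def run_py_alt (conflicting_decisions : List (List (String × String))) (system_dependencies : Option (List (String × List String))) : String :=
  if conflicting_decisions = [] then "No conflicts detected"
  else
    let resolution :=
      [3, 2, 1, 0].flatMap (fun wanted => pvLinesFor conflicting_decisions system_dependencies wanted)
    "Conflict Resolution:\n" ++ PySem.Str.join "\n" resolution

-- ===== PRECONDITION & SPEC =====
-- Pre_ excludes exactly the inputs where priority_order.index raises ValueError in both A and B: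
-- a decision whose "priority" value (default "low") is not one of the four priority names.
def Pre_run_py (conflicting_decisions : List (List (String × String))) (system_dependencies : Option (List (String × List String))) : Prop :=
  ∀ d ∈ conflicting_decisions, pvGetD d "priority" "low" ∈ pvPriorityOrder

instance (conflicting_decisions : List (List (String × String))) (system_dependencies : Option (List (String × List String))) : Decidable (Pre_run_py conflicting_decisions system_dependencies) := by unfold Pre_run_py; infer_instance

def pvWitness_run_py : (List (List (String × String))) × (Option (List (String × List String))) :=
  ([[("priority", "high"), ("agent_type", "hvac"), ("action", "cool")],
    [("priority", "critical"), ("agent_type", "power"), ("action", "shed")],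
    [("agent_type", "hvac"), ("action", "vent")]],
   some [("hvac", ["power", "sensors"]), ("power", [])])

def Spec_run_py (conflicting_decisions : List (List (String × String))) (system_dependencies : Option (List (String × List String))) (out : String) : Prop := out = run_py_alt conflicting_decisions system_dependencies
instance (conflicting_decisions : List (List (String × String))) (system_dependencies : Option (List (String × List String))) (out : String) : Decidable (Spec_run_py conflicting_decisions system_dependencies out) := by unfold Spec_run_py; infer_instance

-- ===== CLAIM =====
def Claim_equal_run_py : Prop := ∀ (conflicting_decisions : List (List (String × String))) (system_dependencies : Option (List (String × List String))), Dom_run_py conflicting_decisions system_dependencies → Pre_run_py conflicting_decisions system_dependencies → Spec_run_py conflicting_decisions system_dependencies (run_py conflicting_decisions system_dependencies)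

-- ===== LEMMAS AND PROOFS =====

-- the bucket of priority index i, in input order
def pvFilt (cd : List (List (String × String))) (i : Nat) : List (List (String × String)) :=
  cd.filter (fun d => pvKey d == i)

theorem pvKey_le (d : List (String × String)) : pvKey d ≤ 3 := by
  unfold pvKey
  cases h : PySem.List.index? pvPriorityOrder (pvGetD d "priority" "low") with
  | none => simp
  | some k =>
    obtain ⟨hk, -, -⟩ := PySem.List.getElem_of_index?_eq_some h
    simp only [Option.getD_some]
    simpa [pvPriorityOrder] using Nat.lt_succ_iff.mp (by simpa [pvPriorityOrder] using hk)

-- insertion into A ++ B lands exactly between them when x goes after all of A and before all of B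
theorem pv_insertBy_append {α : Type} (before : α → α → Bool) (x : α) (A B : List α)
    (hA : ∀ a ∈ A, before x a = false) (hB : ∀ b ∈ B, before x b = true) :
    PySem.List.insertBy before x (A ++ B) = A ++ x :: B := by
  induction A with
  | nil =>
    cases B with
    | nil => simp [PySem.List.insertBy]
    | cons b bs => simp [PySem.List.insertBy, hB b (by simp)]
  | cons a A ih =>
    simp only [List.cons_append, PySem.List.insertBy, hA a (by simp), Bool.false_eq_true,
      if_false]
    simp [ih (fun a' h => hA a' (by simp [h]))]

theorem pvKey_of_mem_filt {d : List (String × String)} {cd : List (List (String × String))}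
    {i : Nat} (h : d ∈ pvFilt cd i) : pvKey d = i := by
  have := (List.mem_filter.mp h).2
  simpa using this

-- A's stable reverse sort by priority index IS the buckets read from index 3 down to 0
theorem pv_sorted_eq (cd : List (List (String × String))) :
    PySem.List.sorted cd (fun d => pvKey d) true
      = pvFilt cd 3 ++ pvFilt cd 2 ++ pvFilt cd 1 ++ pvFilt cd 0 := by
  rw [PySem.List.sorted_rev_eq_foldl_insertBy]
  induction cd using List.reverseRecOn with
  | nil => simp [pvFilt]
  | append_singleton ys x ih =>
    rw [List.foldl_append, List.foldl_cons, List.foldl_nil, ih]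
    have hx := pvKey_le x
    have h3 : pvKey x = 0 ∨ pvKey x = 1 ∨ pvKey x = 2 ∨ pvKey x = 3 := by omega
    rcases h3 with h | h | h | h
    · rw [show pvFilt ys 3 ++ pvFilt ys 2 ++ pvFilt ys 1 ++ pvFilt ys 0
            = (pvFilt ys 3 ++ pvFilt ys 2 ++ pvFilt ys 1 ++ pvFilt ys 0) ++ [] by simp,
        pv_insertBy_append _ x _ []
          (by intro a ha; simp only [List.append_assoc, List.mem_append] at ha
              rcases ha with ha | ha | ha | ha <;>
                simp [pvKey_of_mem_filt ha, h]
            )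
          (by intro b hb; simp at hb)]
      simp [pvFilt, List.filter_append, h, List.append_assoc]
    · rw [show pvFilt ys 3 ++ pvFilt ys 2 ++ pvFilt ys 1 ++ pvFilt ys 0
            = (pvFilt ys 3 ++ pvFilt ys 2 ++ pvFilt ys 1) ++ pvFilt ys 0 by simp,
        pv_insertBy_append _ x _ _
          (by intro a ha; simp only [List.append_assoc, List.mem_append] at ha
              rcases ha with ha | ha | ha <;>
                simp [pvKey_of_mem_filt ha, h])
          (by intro b hb; simp [pvKey_of_mem_filt hb, h])]
      simp [pvFilt, List.filter_append, h, List.append_assoc]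
    · rw [show pvFilt ys 3 ++ pvFilt ys 2 ++ pvFilt ys 1 ++ pvFilt ys 0
            = (pvFilt ys 3 ++ pvFilt ys 2) ++ (pvFilt ys 1 ++ pvFilt ys 0) by simp,
        pv_insertBy_append _ x _ _
          (by intro a ha; simp only [List.mem_append] at ha
              rcases ha with ha | ha <;>
                simp [pvKey_of_mem_filt ha, h])
          (by intro b hb; simp only [List.mem_append] at hb
              rcases hb with hb | hb <;>
                simp [pvKey_of_mem_filt hb, h])]
      simp [pvFilt, List.filter_append, h, List.append_assoc]
    · rw [show pvFilt ys 3 ++ pvFilt ys 2 ++ pvFilt ys 1 ++ pvFilt ys 0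
            = pvFilt ys 3 ++ (pvFilt ys 2 ++ pvFilt ys 1 ++ pvFilt ys 0) by simp,
        pv_insertBy_append _ x _ _
          (by intro a ha; simp [pvKey_of_mem_filt ha, h])
          (by intro b hb; simp only [List.append_assoc, List.mem_append] at hb
              rcases hb with hb | hb | hb <;>
                simp [pvKey_of_mem_filt hb, h])]
      simp [pvFilt, List.filter_append, h, List.append_assoc]

-- B's filtered scan produces exactly the lines of A's loop body on the bucket of index w
theorem pvLinesFor_eq (cd : List (List (String × String)))
    (sd : Option (List (String × List String))) (w : Nat) :
    pvLinesFor cd sd w = (pvFilt cd w).flatMap (pvEmit sd) := by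
  induction cd with
  | nil => simp [pvLinesFor, pvFilt]
  | cons d rest ih =>
    by_cases h : pvKey d = w
    · have hb : (pvKey d == w) = true := by simp [h]
      simp only [pvLinesFor, pvFilt, List.filter_cons]
      rw [show ((PySem.List.index? ["critical", "high", "medium", "low"]
            (PySem.Dict.getD (PySem.Dict.mk d) "priority" "low")).getD 0 == w) = true from hb]
      simp only [if_true, hb, List.flatMap_cons]
      rw [ih]
      rfl
    · have hb : (pvKey d == w) = false := by simp [h]
      simp only [pvLinesFor, pvFilt, List.filter_cons]
      rw [show ((PySem.List.index? ["critical", "high", "medium", "low"]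
            (PySem.Dict.getD (PySem.Dict.mk d) "priority" "low")).getD 0 == w) = false from hb]
      simpa [hb] using ih

-- ===== VERDICT =====
theorem run_py_spec : Claim_equal_run_py := by
  intro cd sd _dom _pre
  unfold Spec_run_py run_py run_py_alt
  by_cases hcd : cd = []
  · simp [hcd]
  · simp only [if_neg hcd]
    rw [pv_sorted_eq]
    simp only [PySem.List.foldl_append_eq_flatMap, List.flatMap_append,
      pvLinesFor_eq, List.flatMap_cons, List.flatMap_nil, List.append_nil,
      List.nil_append, List.append_assoc]
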